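-- pv_equiv track=rewrite | github.com/drew2a/InTask | data_structure/problem/array/array_problems.py | split_array_by_sign
-- ===== SOURCE A (Python) =====
-- def split_array_by_sign(array):
--     if len(array) == 0:
--         return []
--
--     current_array = []
--     previous_number = array[0]
--
--     for n in array:
--         if n * previous_number < 0:
--             yield current_array
--             current_array = []
--
--         current_array.append(n)
--
--         if n != 0:
--             previous_number = n
--
--     if len(current_array) > 0:
--         yield current_array
-- ===== SOURCE B (Python) =====
-- def split_array_by_sign(array):
--     # Pass 1: record, for each position, whether a new segment starts there,
--     # by tracking the sign of the last non-zero element seen so far.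
--     bounds = []
--     sign = 0
--     for i, n in enumerate(array):
--         if n != 0:
--             if sign != 0 and (n > 0) != (sign > 0):
--                 bounds.append(i)
--             sign = n
--     if len(array) == 0:
--         return
--     # Pass 2: yield the slices between consecutive boundaries.
--     for s, e in zip([0] + bounds, bounds + [len(array)]):
--         yield list(array[s:e])
-- ===== Notes on version B (the rewrite author's own statement) =====
-- stated objective: alternative
-- what changed: A builds each segment incrementally with a running accumulator and yields it at each sign flip; B makes two passes: first it records the boundary indices where the sign of the last non-zero element flips, then it yields the slices between consecutive boundaries.
import Mathlib
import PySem

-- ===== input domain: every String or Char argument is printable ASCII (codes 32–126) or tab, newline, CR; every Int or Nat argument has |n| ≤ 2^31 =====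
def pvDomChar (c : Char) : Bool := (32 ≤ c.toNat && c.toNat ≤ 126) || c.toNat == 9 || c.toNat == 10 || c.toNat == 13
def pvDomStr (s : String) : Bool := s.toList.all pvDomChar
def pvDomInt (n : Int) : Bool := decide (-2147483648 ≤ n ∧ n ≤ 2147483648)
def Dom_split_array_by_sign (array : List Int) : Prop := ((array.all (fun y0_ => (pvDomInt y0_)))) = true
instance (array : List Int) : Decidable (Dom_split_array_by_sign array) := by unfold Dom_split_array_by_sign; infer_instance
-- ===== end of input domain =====

-- B replaces A's running segment accumulator by two passes: collect the boundary
-- indices where the sign flips, then emit the slices between consecutive boundaries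
-- (objective: alternative decomposition, same cost).

-- ===== PORT A =====
-- A's loop: state = (current_array, previous_number), yields collected in order.
def splitGoA : List Int → List Int → Int → List (List Int)
  | [], cur, _ => if cur.length > 0 then [cur] else []
  | n :: rest, cur, prev =>
      (if n * prev < 0 then [cur] else []) ++
        splitGoA rest ((if n * prev < 0 then [] else cur) ++ [n]) (if n ≠ 0 then n else prev)

def split_array_by_sign (array : List Int) : List (List Int) :=
  match array with
  | [] => []
  | a :: rest => splitGoA (a :: rest) [] a

-- ===== PORT B =====
-- B's first pass: `for i, n in enumerate(array)` with the running index i and the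
-- sign of the last non-zero element; collects the boundary indices.
def splitBounds : List Int → Nat → Int → List Nat
  | [], _, _ => []
  | n :: rest, i, sign =>
      if n ≠ 0 then
        (if sign ≠ 0 ∧ (decide (n > 0) ≠ decide (sign > 0)) then [i] else []) ++
          splitBounds rest (i + 1) n
      else splitBounds rest (i + 1) sign

-- B's second pass: zip consecutive boundaries and slice.
def split_array_by_sign_alt (array : List Int) : List (List Int) :=
  match array with
  | [] => []
  | _ :: _ =>
    let bounds := splitBounds array 0 0
    ((0 :: bounds).zip (bounds ++ [array.length])).map
      (fun p => PySem.List.slice array (some (p.1 : Int)) (some (p.2 : Int)))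

-- ===== PRECONDITION & SPEC =====
def Spec_split_array_by_sign (array : List Int) (out : List (List Int)) : Prop := out = split_array_by_sign_alt array
instance (array : List Int) (out : List (List Int)) : Decidable (Spec_split_array_by_sign array out) := by unfold Spec_split_array_by_sign; infer_instance

-- ===== CLAIM (what is proved, stated in full; the proofs are below) =====
def Claim_equal_split_array_by_sign : Prop := ∀ (array : List Int), Dom_split_array_by_sign array → Spec_split_array_by_sign array (split_array_by_sign array)

-- ===== LEMMAS AND PROOFS =====

-- the segments named by a boundary list, as drop/take
def splitSegs (arr : List Int) : Nat → List Nat → List (List Int)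
  | s, [] => [(arr.drop s).take (arr.length - s)]
  | s, b :: bs => (arr.drop s).take (b - s) :: splitSegs arr b bs

lemma zipmap_eq_segs (arr : List Int) (bs : List Nat) (s : Nat) :
    ((s :: bs).zip (bs ++ [arr.length])).map
      (fun p => PySem.List.slice arr (some (p.1 : Int)) (some (p.2 : Int)))
      = splitSegs arr s bs := by
  induction bs generalizing s with
  | nil => simp [splitSegs, PySem.List.slice_natCast]
  | cons b bs ih =>
      simp only [List.cons_append, List.zip_cons_cons, List.map_cons, splitSegs]
      rw [ih b, PySem.List.slice_natCast]

lemma mul_neg_iff_signs (n p : Int) :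
    n * p < 0 ↔ (n ≠ 0 ∧ p ≠ 0 ∧ (decide (n > 0) ≠ decide (p > 0))) := by
  constructor
  · intro h
    have hn0 : n ≠ 0 := by rintro rfl; simp at h
    have hp0 : p ≠ 0 := by rintro rfl; simp at h
    refine ⟨hn0, hp0, ?_⟩
    rcases lt_or_gt_of_ne hn0 with hn | hn <;> rcases lt_or_gt_of_ne hp0 with hp | hp
    · exact absurd h (not_lt.mpr (le_of_lt (mul_pos_of_neg_of_neg hn hp)))
    · simp [show ¬ ((0:Int) < n) by omega, hp]
    · simp [hn, show ¬ ((0:Int) < p) by omega]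
    · exact absurd h (not_lt.mpr (le_of_lt (mul_pos hn hp)))
  · rintro ⟨hn0, hp0, hsgn⟩
    rcases lt_or_gt_of_ne hn0 with hn | hn <;> rcases lt_or_gt_of_ne hp0 with hp | hp
    · exact absurd (by simp [show ¬ ((0:Int) < n) by omega, show ¬ ((0:Int) < p) by omega]) hsgn
    · exact mul_neg_of_neg_of_pos hn hp
    · exact mul_neg_of_pos_of_neg hn hp
    · exact absurd (by simp [hn, hp]) hsgn

lemma main_inv (arr : List Int) :
    ∀ (rest : List Int) (s i : Nat) (p : Int),
      arr.drop i = rest → s < i → i ≤ arr.length →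
      splitGoA rest ((arr.drop s).take (i - s)) p
        = splitSegs arr s (splitBounds rest i p) := by
  intro rest
  induction rest with
  | nil =>
    intro s i p hdrop hsi hlen
    have hi : arr.length ≤ i := List.drop_eq_nil_iff.mp hdrop
    have hieq : i = arr.length := le_antisymm hlen hi
    subst hieq
    simp only [splitBounds, splitSegs, splitGoA]
    rw [if_pos (by simp only [List.length_take, List.length_drop]; omega)]
  | cons n rest' ih =>
    intro s i p hdrop hsi hlen
    have hilt : i < arr.length := by
      by_contra h
      have : arr.drop i = [] := List.drop_eq_nil_iff.mpr (by omega)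
      rw [this] at hdrop; simp at hdrop
    have hdrop' : arr.drop (i + 1) = rest' := by
      have : arr.drop (i + 1) = (arr.drop i).drop 1 := by
        rw [List.drop_drop]
      rw [this, hdrop]; rfl
    have hget : arr[i]? = some n := by
      have : arr[i]? = (arr.drop i).head? := by
        rw [List.head?_drop]
      rw [this, hdrop]; rfl
    have hext : (arr.drop s).take (i - s) ++ [n] = (arr.drop s).take (i + 1 - s) := by
      have h1 : i + 1 - s = (i - s) + 1 := by omega
      rw [h1, List.take_add_one]
      have : (arr.drop s)[i - s]? = some n := by
        rw [List.getElem?_drop]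
        have : s + (i - s) = i := by omega
        rw [this, hget]
      simp [this]
    by_cases hsplit : n * p < 0
    · obtain ⟨hn0, hp0, hsgn⟩ := (mul_neg_iff_signs n p).mp hsplit
      simp only [splitGoA, if_pos hsplit, splitBounds, if_pos hn0,
        if_pos (And.intro hp0 hsgn), List.nil_append]
      rw [show ([n] : List Int) = (arr.drop i).take (i + 1 - i) by
        simp [hdrop]]
      rw [ih i (i + 1) n hdrop' (by omega) (by omega)]
      simp [splitSegs]
    · have hbranch : splitBounds (n :: rest') i p = splitBounds rest' (i + 1) (if n ≠ 0 then n else p) := by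
        by_cases hn0 : n = 0
        · simp [splitBounds, hn0]
        · have hcond : ¬ (p ≠ 0 ∧ (decide (n > 0) ≠ decide (p > 0))) := by
            intro ⟨hp0, hsgn⟩
            exact hsplit ((mul_neg_iff_signs n p).mpr ⟨hn0, hp0, hsgn⟩)
          simp only [splitBounds]
          rw [if_pos hn0, if_neg hcond, if_pos hn0, List.nil_append]
      simp only [splitGoA, if_neg hsplit, List.nil_append]
      rw [hext, hbranch]
      exact ih s (i + 1) (if n ≠ 0 then n else p) hdrop' (by omega) (by omega)

-- ===== VERDICT (by name: the statement is the Claim_ definition above) =====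
theorem split_array_by_sign_spec : Claim_equal_split_array_by_sign := by
  intro array _
  unfold Spec_split_array_by_sign
  match array with
  | [] => rfl
  | a :: rest =>
    show splitGoA (a :: rest) [] a = split_array_by_sign_alt (a :: rest)
    have hfirst : ¬ (a * a < 0) := not_lt.mpr (mul_self_nonneg a)
    have hstep : splitGoA (a :: rest) [] a = splitGoA rest [a] a := by
      simp [splitGoA, hfirst]
    have hbounds : splitBounds (a :: rest) 0 0 = splitBounds rest 1 a := by
      by_cases ha : a = 0
      · simp [splitBounds, ha]
      · simp [splitBounds, ha]
    rw [hstep]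
    unfold split_array_by_sign_alt
    simp only [hbounds]
    rw [zipmap_eq_segs]
    have := main_inv (a :: rest) (List.drop 1 (a :: rest)) 0 1 a rfl (by omega)
      (Nat.succ_le_succ (Nat.zero_le _))
    simpa using this
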